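-- pv_equiv track=rewrite | github.com/gongpha/pscp-psit-archive | kunlapat/week4/Sequence III bad.py | gen_array
-- ===== SOURCE A (Python) =====
-- def gen_array(init: list[int], time: int, result=None) -> list[list[int]]:
--     """create an list of list with each list got each of its member appended by 1"""
--     if result is None:
--         result = []
--
--     if time == 0:
--         result.append(init)
--     else:
--         result.append(init)
--         gen_array([x+1 for x in init], time - 1, result)
--     return result
-- ===== SOURCE B (Python) =====
-- def gen_array(init: list[int], time: int, result=None) -> list[list[int]]:
--     """create an list of list with each list got each of its member appended by 1"""
--     if result is None:
--         result = []
--     result.append(init)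
--     result.extend([x + k for x in init] for k in range(1, time + 1))
--     return result
-- ===== Notes on version B (the rewrite author's own statement) =====
-- stated objective: alternative
-- what changed: Replaced A's recursion with a closed form: row k is init shifted by k, produced directly by a range comprehension instead of a running list threaded through recursive calls.
import Mathlib
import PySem

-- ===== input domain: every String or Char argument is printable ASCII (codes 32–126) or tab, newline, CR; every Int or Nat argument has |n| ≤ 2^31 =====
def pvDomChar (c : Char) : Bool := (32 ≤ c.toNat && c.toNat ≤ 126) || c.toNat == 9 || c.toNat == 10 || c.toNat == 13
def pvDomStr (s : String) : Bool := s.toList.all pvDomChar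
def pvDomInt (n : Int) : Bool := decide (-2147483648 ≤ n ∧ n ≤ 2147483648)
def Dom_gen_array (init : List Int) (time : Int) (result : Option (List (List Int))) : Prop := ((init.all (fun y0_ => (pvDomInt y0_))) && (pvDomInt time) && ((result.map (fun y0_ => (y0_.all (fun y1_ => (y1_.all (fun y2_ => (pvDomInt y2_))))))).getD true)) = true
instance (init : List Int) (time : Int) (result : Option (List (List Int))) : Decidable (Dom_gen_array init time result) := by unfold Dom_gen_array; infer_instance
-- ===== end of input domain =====

-- B replaces A's recursion with a closed form (row k = init shifted by k, from a range comprehension).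
-- Equivalence is about the RETURN value only: Python A and B both mutate the passed-in `result` list the same way.
-- ===== PORT A =====
-- A recurses with `time - 1` until time == 0; on time ≥ 0 (Pre_) that is exactly time.toNat steps.
def gen_array_A_loop (init : List Int) : Nat → List (List Int) → List (List Int)
  | 0, acc => acc ++ [init]
  | n + 1, acc => gen_array_A_loop (init.map (· + 1)) n (acc ++ [init])

def gen_array (init : List Int) (time : Int) (result : Option (List (List Int))) : List (List Int) :=
  gen_array_A_loop init time.toNat (result.getD [])

-- ===== PORT B =====
-- Source B: result.append(init); result.extend([x + k for x in init] for k in range(1, time + 1))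
def gen_array_alt (init : List Int) (time : Int) (result : Option (List (List Int))) : List (List Int) :=
  (result.getD [] ++ [init]) ++ (PySem.List.pyRange 1 (time + 1) 1).map (fun k => init.map (fun x => x + k))

-- ===== PRECONDITION & SPEC =====
-- Pre_ excludes time < 0, on which Python A overflows the stack (RecursionError).
def Pre_gen_array (init : List Int) (time : Int) (result : Option (List (List Int))) : Prop := 0 ≤ time
instance (init : List Int) (time : Int) (result : Option (List (List Int))) : Decidable (Pre_gen_array init time result) := by unfold Pre_gen_array; infer_instance
def pvWitness_gen_array : List Int × Int × Option (List (List Int)) := ([1, 2], 3, none)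

def Spec_gen_array (init : List Int) (time : Int) (result : Option (List (List Int))) (out : List (List Int)) : Prop := out = gen_array_alt init time result
instance (init : List Int) (time : Int) (result : Option (List (List Int))) (out : List (List Int)) : Decidable (Spec_gen_array init time result out) := by unfold Spec_gen_array; infer_instance

-- ===== CLAIM =====
def Claim_equal_gen_array : Prop := ∀ (init : List Int) (time : Int) (result : Option (List (List Int))), Dom_gen_array init time result → Pre_gen_array init time result → Spec_gen_array init time result (gen_array init time result)

-- ===== LEMMAS AND PROOFS =====
-- A's accumulator recursion computes exactly the n+1 shifted rows appended to acc.
theorem A_loop_closed (n : Nat) : ∀ (init : List Int) (acc : List (List Int)),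
    gen_array_A_loop init n acc
      = acc ++ (List.range (n + 1)).map (fun (k : Nat) => init.map (fun x => x + (k : Int))) := by
  induction n with
  | zero => intro init acc; simp [gen_array_A_loop]
  | succ n ih =>
      intro init acc
      rw [gen_array_A_loop, ih]
      conv_rhs => rw [List.range_succ_eq_map]
      simp only [List.map_cons, List.map_map, List.append_assoc, List.singleton_append,
        Nat.cast_zero]
      refine congrArg _ ?_
      refine congrArg₂ _ (by simp) ?_
      refine List.map_congr_left ?_
      intro k _
      refine List.map_congr_left ?_
      intro x _
      simp only [Function.comp_apply]
      push_cast
      ring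

-- ===== VERDICT =====
theorem gen_array_spec : Claim_equal_gen_array := by
  intro init time result _ hpre
  unfold Spec_gen_array gen_array gen_array_alt
  rw [A_loop_closed, PySem.List.pyRange_one]
  have h1 : (time + 1 - 1).toNat = time.toNat := by omega
  rw [h1, List.range_succ_eq_map]
  simp only [List.map_cons, List.map_map, List.append_assoc, Nat.cast_zero]
  refine congrArg _ ?_
  refine congrArg₂ _ (by simp) ?_
  refine List.map_congr_left ?_
  intro k _
  refine List.map_congr_left ?_
  intro x _
  push_cast
  ring
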